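-- pv_equiv track=rewrite | github.com/alexandraback/datacollection | solutions_5636311922769920_1/Python/willothewisp/D.py | go
-- ===== SOURCE A (Python) =====
-- def go(K, C, S):
--     need = (K - 1) // C + 1
--     if need > S:
--         return 'IMPOSSIBLE'
--     res = []
--     branches = list(range(K))
--     for i in range(0, K, C):
--         cur = 0
--         for branch in branches[i:i + C]:
--             cur = K*cur + branch
--         res.append(cur)
--     return ' '.join(str(cur + 1) for cur in res)
-- ===== SOURCE B (Python) =====
-- def go(K, C, S):
--     if (K - 1) // C + 1 > S:
--         return 'IMPOSSIBLE'
--     out = []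
--     cur, cnt = 0, 0
--     for b in range(K):
--         cur = K * cur + b
--         cnt += 1
--         if cnt == C:
--             out.append(str(cur + 1))
--             cur, cnt = 0, 0
--     if cnt != 0:
--         out.append(str(cur + 1))
--     return ' '.join(out)
-- ===== Notes on version B (the rewrite author's own statement) =====
-- stated objective: alternative
-- what changed: A runs two nested loops: an outer loop over group starts range(0,K,C) and an inner Horner loop over a slice of a materialized list(range(K)); B is one flat streaming pass over range(K) carrying a running code and a counter, flushing a finished group's string when the counter reaches C and flushing the final partial group after the loop.
-- outside the precondition, e.g. on go(3, -2, 100): A returns '', B returns '6'; on go(-5, -2, 100): A returns '1 1 1', B returns ''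
import Mathlib
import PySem

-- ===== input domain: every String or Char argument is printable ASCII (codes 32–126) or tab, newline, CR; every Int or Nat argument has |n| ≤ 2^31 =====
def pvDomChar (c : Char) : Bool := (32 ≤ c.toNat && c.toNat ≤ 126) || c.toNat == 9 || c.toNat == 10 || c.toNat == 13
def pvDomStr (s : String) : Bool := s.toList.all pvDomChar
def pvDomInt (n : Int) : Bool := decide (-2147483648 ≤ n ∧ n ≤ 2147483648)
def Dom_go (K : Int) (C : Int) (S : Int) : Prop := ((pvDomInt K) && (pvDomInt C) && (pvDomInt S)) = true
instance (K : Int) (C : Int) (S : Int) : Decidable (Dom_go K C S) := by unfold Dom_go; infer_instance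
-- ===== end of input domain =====

-- B replaces A's two nested loops (outer over group starts, inner Horner over a slice of a
-- materialized list(range(K))) by ONE flat streaming pass over range(K) that carries a running
-- code and a counter and flushes a finished group when the counter reaches C (objective: alternative).

-- ===== PORT A =====
def go (K : Int) (C : Int) (S : Int) : String :=
  let need := PySem.Int.floordiv (K - 1) C + 1
  if need > S then "IMPOSSIBLE"
  else
    let branches := PySem.List.pyRange 0 K 1
    let res : List Int := (PySem.List.pyRange 0 K C).foldl
      (fun res i =>
        res ++ [(PySem.List.slice branches (some i) (some (i + C))).foldl
                  (fun cur branch => K * cur + branch) 0]) []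
    PySem.Str.join " " (res.map fun cur => PySem.Int.toStr (cur + 1))

-- ===== PORT B =====
-- B-side helper: the body of B's single loop (state = (out, cur, cnt)).
def goStep (K : Int) (C : Int) (st : List String × Int × Int) (b : Int) : List String × Int × Int :=
  let cur := K * st.2.1 + b
  let cnt := st.2.2 + 1
  if cnt = C then (st.1 ++ [PySem.Int.toStr (cur + 1)], 0, 0)
  else (st.1, cur, cnt)

def go_alt (K : Int) (C : Int) (S : Int) : String :=
  if PySem.Int.floordiv (K - 1) C + 1 > S then "IMPOSSIBLE"
  else
    let st := (PySem.List.pyRange 0 K 1).foldl (goStep K C) ([], 0, 0)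
    let out := if st.2.2 ≠ 0 then st.1 ++ [PySem.Int.toStr (st.2.1 + 1)] else st.1
    PySem.Str.join " " out

-- ===== PRECONDITION & SPEC =====
-- Pre_ excludes C = 0, on which Python A raises ZeroDivisionError, and C < 0, where range's
-- negative-step semantics make A's grouping degenerate (empty or index-less groups) so A's
-- output there is an accident of the implementation and B's single forward pass another
-- defensible value of the same unspecified corner.
def Pre_go (K : Int) (C : Int) (S : Int) : Prop := 0 < C
instance (K : Int) (C : Int) (S : Int) : Decidable (Pre_go K C S) := by unfold Pre_go; infer_instance
def pvWitness_go : Int × Int × Int := (5, 2, 3)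

def Spec_go (K : Int) (C : Int) (S : Int) (out : String) : Prop := out = go_alt K C S
instance (K : Int) (C : Int) (S : Int) (out : String) : Decidable (Spec_go K C S out) := by unfold Spec_go; infer_instance

-- ===== CLAIM (what is proved, stated in full; the proofs are below) =====
def Claim_equal_go : Prop := ∀ (K : Int) (C : Int) (S : Int), Dom_go K C S → Pre_go K C S → Spec_go K C S (go K C S)

-- ===== LEMMAS AND PROOFS =====

-- dropping n elements of range(a,b) is range(a+n,b)
theorem drop_pyRange_one (n : Nat) (a b : Int) :
    (PySem.List.pyRange a b 1).drop n = PySem.List.pyRange (a + n) b 1 := by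
  induction n generalizing a with
  | zero => simp
  | succ n ih =>
    by_cases h : a < b
    · rw [PySem.List.pyRange_one_cons h, List.drop_succ_cons, ih (a + 1)]
      congr 1; push_cast; ring
    · rw [PySem.List.pyRange_one_eq_nil (by omega), PySem.List.pyRange_one_eq_nil (by omega),
        List.drop_nil]

-- taking n elements of range(a,b) is range(a, min(a+n,b))
theorem take_pyRange_one (n : Nat) (a b : Int) :
    (PySem.List.pyRange a b 1).take n = PySem.List.pyRange a (min (a + n) b) 1 := by
  induction n generalizing a with
  | zero =>
    rw [List.take_zero]
    exact (PySem.List.pyRange_one_eq_nil (by push_cast; omega)).symm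
  | succ n ih =>
    by_cases h : a < b
    · rw [PySem.List.pyRange_one_cons h, List.take_succ_cons, ih (a + 1),
        PySem.List.pyRange_one_cons (a := a) (b := min (a + ((n:Nat)+1 : Nat)) b) (by push_cast; omega)]
      congr 2
      push_cast; omega
    · rw [PySem.List.pyRange_one_eq_nil (by omega), List.take_nil,
        PySem.List.pyRange_one_eq_nil (by push_cast; omega)]

-- range(a, b, C) with C > 0 and b ≤ a is empty
theorem pyRange_pos_eq_nil {a b C : Int} (hC : 0 < C) (h : b ≤ a) :
    PySem.List.pyRange a b C = [] := by
  rw [PySem.List.pyRange_of_pos a b hC, if_neg (by omega)]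
  simp

-- range(a, b, C) with C > 0 and a < b starts with a
theorem pyRange_pos_cons {a b C : Int} (hC : 0 < C) (h : a < b) :
    PySem.List.pyRange a b C = a :: PySem.List.pyRange (a + C) b C := by
  rw [PySem.List.pyRange_of_pos a b hC, PySem.List.pyRange_of_pos (a + C) b hC,
    if_pos h]
  by_cases h2 : a + C < b
  · rw [if_pos h2]
    have hc : ((b - a + C - 1) / C).toNat = ((b - (a + C) + C - 1) / C).toNat + 1 := by
      have h3 : (b - a + C - 1) / C = (b - (a + C) + C - 1) / C + 1 := by
        have : b - a + C - 1 = (b - (a + C) + C - 1) + 1 * C := by ring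
        rw [this, Int.add_mul_ediv_right _ _ (by omega)]
      have h4 : 0 ≤ (b - (a + C) + C - 1) / C := Int.ediv_nonneg (by omega) (by omega)
      omega
    rw [hc, List.range_succ_eq_map, List.map_cons, List.map_map]
    congr 1
    · simp
    · apply List.map_congr_left; intro k _; simp; ring
  · rw [if_neg h2]
    have hc : ((b - a + C - 1) / C).toNat = 1 := by
      have h3 : (b - a + C - 1) / C = 1 := by
        have e1 : b - a + C - 1 = (b - a - 1) + 1 * C := by ring
        rw [e1, Int.add_mul_ediv_right _ _ (by omega : C ≠ 0),
          Int.ediv_eq_zero_of_lt (by omega) (by omega)]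
        omega
      omega
    simp [hc, List.range_succ]

-- B's loop over a range shorter than the remaining group budget: no flush, the code
-- accumulates by Horner and the counter advances by the length.
theorem run_partial (K C : Int) (n : Nat) :
    ∀ (a : Int) (out : List String) (cur cnt : Int), cnt + n < C →
    (PySem.List.pyRange a (a + n) 1).foldl (goStep K C) (out, cur, cnt)
      = (out, (PySem.List.pyRange a (a + n) 1).foldl (fun c x => K * c + x) cur, cnt + n) := by
  induction n with
  | zero =>
    intro a out cur cnt _
    rw [PySem.List.pyRange_one_eq_nil (by push_cast; omega)]
    simp
  | succ n ih =>
    intro a out cur cnt h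
    rw [PySem.List.pyRange_one_cons (by push_cast; omega)]
    simp only [List.foldl_cons]
    have hstep : goStep K C (out, cur, cnt) a = (out, K * cur + a, cnt + 1) := by
      simp only [goStep]
      rw [if_neg (by push_cast at h; omega)]
    rw [hstep]
    have hb : a + ((n : Nat) + 1 : Nat) = (a + 1) + (n : Nat) := by push_cast; ring
    rw [hb, ih (a + 1) out (K * cur + a) (cnt + 1) (by push_cast at h ⊢; omega)]
    simp only [Prod.mk.injEq]
    refine ⟨trivial, trivial, by push_cast; ring⟩

-- B's loop over one full group of length C flushes exactly once, appending the group's code.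
theorem run_full (K C : Int) (hC : 0 < C) (a : Int) (out : List String) :
    (PySem.List.pyRange a (a + C) 1).foldl (goStep K C) (out, 0, 0)
      = (out ++ [PySem.Int.toStr
          ((PySem.List.pyRange a (a + C) 1).foldl (fun c x => K * c + x) 0 + 1)], 0, 0) := by
  have hsplit : PySem.List.pyRange a (a + C) 1
      = PySem.List.pyRange a (a + C - 1) 1 ++ [a + C - 1] := by
    have := PySem.List.pyRange_one_succ_right (a := a) (b := a + C - 1) (by omega)
    rw [show a + C - 1 + 1 = a + C by ring] at this
    exact this
  rw [hsplit, List.foldl_append]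
  have hn : a + C - 1 = a + ((C - 1).toNat : Int) := by omega
  rw [hn, run_partial K C (C - 1).toNat a out 0 0 (by omega)]
  simp only [List.foldl_append, List.foldl_cons, List.foldl_nil]
  simp only [goStep]
  rw [if_pos (by omega)]

-- B's whole loop-plus-final-flush over range(i, K) produces exactly one string per group,
-- matching A's per-group Horner values (fuel n bounds the number of remaining groups).
theorem run_main (K C : Int) (hC : 0 < C) (n : Nat) :
    ∀ (i : Int) (out : List String), K ≤ i + n * C →
    (let st := (PySem.List.pyRange i K 1).foldl (goStep K C) (out, 0, 0)
     if st.2.2 ≠ 0 then st.1 ++ [PySem.Int.toStr (st.2.1 + 1)] else st.1)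
      = out ++ (PySem.List.pyRange i K C).map
          (fun j => PySem.Int.toStr
            ((PySem.List.pyRange j (min (j + C) K) 1).foldl (fun c x => K * c + x) 0 + 1)) := by
  induction n with
  | zero =>
    intro i out h
    simp only [Nat.cast_zero, zero_mul, add_zero] at h
    rw [PySem.List.pyRange_one_eq_nil h, pyRange_pos_eq_nil hC h]
    simp
  | succ n ih =>
    intro i out h
    by_cases hiK : K ≤ i
    · rw [PySem.List.pyRange_one_eq_nil hiK, pyRange_pos_eq_nil hC hiK]
      simp
    · push Not at hiK
      by_cases hfull : i + C ≤ K
      · -- full group, then recurse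
        rw [PySem.List.pyRange_one_append i (i + C) K (by omega) hfull, List.foldl_append,
          run_full K C hC i out]
        have hrec := ih (i + C) (out ++ [PySem.Int.toStr
          ((PySem.List.pyRange i (i + C) 1).foldl (fun c x => K * c + x) 0 + 1)])
          (by have e : ((n : Int) + 1) * C = (n : Int) * C + C := by ring
              push_cast at h; linarith)
        simp only at hrec ⊢
        rw [hrec, pyRange_pos_cons hC hiK, List.map_cons, List.append_assoc,
          List.singleton_append, min_eq_left hfull]
      · -- final partial group
        push Not at hfull
        have hn2 : K = i + ((K - i).toNat : Int) := by omega
        have hpart := run_partial K C (K - i).toNat i out 0 0 (by omega)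
        rw [← hn2] at hpart
        simp only [hpart]
        rw [if_pos (by omega : (0 : Int) + ((K - i).toNat : Int) ≠ 0)]
        rw [pyRange_pos_cons hC hiK, pyRange_pos_eq_nil hC (by omega), List.map_cons,
          List.map_nil, min_eq_right (by omega)]

-- per-group: A's slice of list(range(K)) is exactly range(i, min(i+C, K))
theorem slice_group (K C i : Int) (hC : 0 < C) (h0i : 0 ≤ i) :
    PySem.List.slice (PySem.List.pyRange 0 K 1) (some i) (some (i + C))
      = PySem.List.pyRange i (min (i + C) K) 1 := by
  rw [PySem.List.slice_toNat _ h0i (by omega), drop_pyRange_one, take_pyRange_one]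
  congr 1 <;> omega

-- ===== VERDICT (by name: the statement is the Claim_ definition above) =====
theorem go_spec : Claim_equal_go := by
  intro K C S _ hC
  unfold Spec_go
  simp only [go, go_alt]
  by_cases h : PySem.Int.floordiv (K - 1) C + 1 > S
  · rw [if_pos h, if_pos h]
  · rw [if_neg h, if_neg h]
    have hmain := run_main K C hC K.toNat 0 []
      (by have hC' : (0 : Int) < C := hC
          have h1 := mul_le_mul_of_nonneg_left (by omega : (1 : Int) ≤ C)
            (Int.natCast_nonneg K.toNat)
          linarith [Int.self_le_toNat K])
    simp only [List.nil_append] at hmain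
    rw [hmain, PySem.List.foldl_append_singleton_eq_map, List.nil_append, List.map_map]
    congr 1
    apply List.map_congr_left
    intro i hi
    obtain ⟨h0i, -, -⟩ := (PySem.List.mem_pyRange_iff_of_pos hC i).1 hi
    simp only [Function.comp]
    rw [slice_group K C i hC h0i]
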